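-- pv_equiv track=rewrite | github.com/Vaishnavi-kute/LeetCode | 0868-binary-gap/0868-binary-gap.py | binaryGap
-- ===== SOURCE A (Python) =====
-- def binaryGap(n: int) -> int:
--     last_pos = -1
--     max_gap = 0
--     pos = 0
--
--     while n > 0:
--         if n & 1:
--             if last_pos != -1:
--                 max_gap = max(max_gap, pos - last_pos)
--             last_pos = pos
--         n >>= 1
--         pos += 1
--
--     return max_gap
-- ===== SOURCE B (Python) =====
-- def binaryGap(n: int) -> int:
--     if n <= 0:
--         return 0
--     s = bin(n)[2:]
--     pos = [i for i, c in enumerate(s) if c == '1']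
--     return max((b - a for a, b in zip(pos, pos[1:])), default=0)
-- ===== Notes on version B (the rewrite author's own statement) =====
-- stated objective: idiomatic
-- what changed: Replaces the single-pass shift-and-mask loop tracking last_pos/max_gap with building the list of set-bit positions from the binary digit string and taking the max of adjacent differences (default 0).
import Mathlib
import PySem

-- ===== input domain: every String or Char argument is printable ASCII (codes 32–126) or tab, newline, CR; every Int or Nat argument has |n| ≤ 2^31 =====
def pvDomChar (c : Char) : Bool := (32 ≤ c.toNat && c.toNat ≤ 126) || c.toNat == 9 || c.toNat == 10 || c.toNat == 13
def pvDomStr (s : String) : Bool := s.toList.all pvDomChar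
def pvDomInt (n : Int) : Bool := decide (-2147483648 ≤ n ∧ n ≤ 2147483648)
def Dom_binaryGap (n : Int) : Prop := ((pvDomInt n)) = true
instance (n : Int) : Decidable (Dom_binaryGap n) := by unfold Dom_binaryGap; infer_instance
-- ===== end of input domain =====

-- B replaces A's single-pass shift-and-mask gap tracking by collecting the set-bit
-- positions of the binary digit string and taking the max of adjacent differences
-- (objective: idiomatic; same O(log n) cost).

-- ===== PORT A =====
-- the while loop of A: state (last_pos, max_gap, pos); 'n & 1' on a positive n is
-- 'n % 2 != 0' and 'n >>= 1' is floor division by 2 (exact for all ints)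
def binaryGapGo (n last_pos max_gap pos : Int) : Int :=
  if h : 0 < n then
    if PySem.Int.mod n 2 ≠ 0 then
      if last_pos ≠ -1 then
        binaryGapGo (PySem.Int.floordiv n 2) pos (max max_gap (pos - last_pos)) (pos + 1)
      else
        binaryGapGo (PySem.Int.floordiv n 2) pos max_gap (pos + 1)
    else
      binaryGapGo (PySem.Int.floordiv n 2) last_pos max_gap (pos + 1)
  else
    max_gap
termination_by n.toNat
decreasing_by all_goals
  · rw [PySem.Int.floordiv_eq_ediv_of_pos (by omega : (0:Int) < 2)]; omega

def binaryGap (n : Int) : Int := binaryGapGo n (-1) 0 0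

-- ===== PORT B =====
-- the digits of bin(m) (MSB first) as 0/1 naturals; bin(m)[2:] is represented by
-- this digit list (exact: only which characters equal '1' is consumed)
def bitsOf (m : Nat) : List Nat :=
  if h : m = 0 then [] else bitsOf (m / 2) ++ [m % 2]
decreasing_by exact Nat.div_lt_self (Nat.pos_of_ne_zero h) (by omega)

def binaryGap_alt (n : Int) : Int :=
  if n ≤ 0 then 0
  else
    -- pos = [i for i, c in enumerate(s) if c == '1']
    let pos : List Int := (PySem.List.enumerate (bitsOf n.toNat) 0).filterMap
      (fun ic => if ic.2 = 1 then some ic.1 else none)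
    -- max((b - a for a, b in zip(pos, pos[1:])), default=0)
    let diffs := List.zipWith (fun a b => b - a) pos (PySem.List.slice pos (some 1) none)
    (PySem.List.max? diffs (fun y => y)).getD 0

-- ===== PRECONDITION & SPEC =====
def Spec_binaryGap (n : Int) (out : Int) : Prop := out = binaryGap_alt n
instance (n : Int) (out : Int) : Decidable (Spec_binaryGap n out) := by unfold Spec_binaryGap; infer_instance

-- ===== CLAIM (what is proved, stated in full; the proofs are below) =====
def Claim_equal_binaryGap : Prop := ∀ (n : Int), Dom_binaryGap n → Spec_binaryGap n (binaryGap n)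

-- ===== LEMMAS AND PROOFS =====

-- set-bit positions of m, LSB first (ascending)
def lsbPos (m : Nat) : List Nat :=
  if h : m = 0 then []
  else if m % 2 = 1 then 0 :: (lsbPos (m / 2)).map (· + 1)
  else (lsbPos (m / 2)).map (· + 1)
decreasing_by all_goals exact Nat.div_lt_self (Nat.pos_of_ne_zero h) (by omega)

-- A's loop abstracted over the list of absolute set-bit positions
def amax : List Int → Int → Int → Int
  | [], _, mg => mg
  | p :: t, last, mg => amax t p (if last ≠ -1 then max mg (p - last) else mg)

-- adjacent differences
def adjDiffs (l : List Int) : List Int := List.zipWith (fun a b => b - a) l l.tail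

def gapsFrom (last : Int) : List Int → List Int
  | [] => []
  | p :: t => (p - last) :: gapsFrom p t

lemma adjDiffs_nil : adjDiffs [] = [] := rfl
lemma adjDiffs_singleton (a : Int) : adjDiffs [a] = [] := rfl
lemma adjDiffs_cons_cons (a b : Int) (t : List Int) :
    adjDiffs (a :: b :: t) = (b - a) :: adjDiffs (b :: t) := rfl

lemma gapsFrom_eq_adjDiffs (t : List Int) : ∀ p, gapsFrom p t = adjDiffs (p :: t) := by
  induction t with
  | nil => intro p; rfl
  | cons q t ih => intro p; simp [gapsFrom, adjDiffs_cons_cons, ih q]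

lemma lsbPos_ne_nil : ∀ m : Nat, m ≠ 0 → lsbPos m ≠ [] := by
  intro m
  induction m using Nat.strong_induction_on with
  | _ m ih =>
    intro hm
    rw [lsbPos, dif_neg hm]
    by_cases hb : m % 2 = 1
    · simp [hb]
    · have hq : m / 2 ≠ 0 := by omega
      rw [if_neg hb]
      intro h
      exact ih (m / 2) (Nat.div_lt_self (Nat.pos_of_ne_zero hm) (by omega)) hq
        (List.map_eq_nil_iff.mp h)

lemma lsbPos_chain (m : Nat) : (lsbPos m).IsChain (· < ·) := by
  induction m using Nat.strong_induction_on with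
  | _ m ih =>
    rw [lsbPos]
    by_cases hm : m = 0
    · rw [dif_pos hm]; exact List.IsChain.nil
    rw [dif_neg hm]
    have hlt : m / 2 < m := Nat.div_lt_self (Nat.pos_of_ne_zero hm) (by omega)
    have hmap : ((lsbPos (m / 2)).map (· + 1)).IsChain (· < ·) := by
      rw [List.isChain_map]
      exact (ih _ hlt).imp (fun h => by omega)
    by_cases hb : m % 2 = 1
    · rw [if_pos hb]
      refine List.isChain_cons'.mpr ⟨?_, hmap⟩
      intro b hb'
      rcases List.head?_eq_some_iff.mp hb' with ⟨t, ht⟩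
      have : b ∈ (lsbPos (m / 2)).map (· + 1) := by rw [ht]; exact List.mem_cons_self
      rcases List.mem_map.mp this with ⟨x, _, hx⟩
      omega
    · rw [if_neg hb]; exact hmap

lemma adjDiffs_pos (l : List Int) (hc : l.IsChain (· < ·)) : ∀ x ∈ adjDiffs l, 0 < x := by
  induction l with
  | nil => intro x hx; simp [adjDiffs_nil] at hx
  | cons a t ih =>
    cases t with
    | nil => intro x hx; simp [adjDiffs_singleton] at hx
    | cons b t' =>
      rw [List.isChain_cons_cons] at hc
      intro x hx
      rw [adjDiffs_cons_cons] at hx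
      rcases List.mem_cons.mp hx with h | h
      · omega
      · exact ih hc.2 x h

-- A's loop equals amax over the (shifted) LSB-first positions
lemma binaryGapGo_eq_amax (m : Nat) :
    ∀ (last mg pos : Int),
      binaryGapGo (m : Int) last mg pos =
        amax ((lsbPos m).map (fun i : Nat => (i : Int) + pos)) last mg := by
  induction m using Nat.strong_induction_on with
  | _ m ih =>
    intro last mg pos
    by_cases hm : m = 0
    · subst hm
      rw [binaryGapGo, lsbPos]
      simp [amax]
    have hpos : (0 : Int) < (m : Int) := by exact_mod_cast Nat.pos_of_ne_zero hm
    have hlt : m / 2 < m := Nat.div_lt_self (Nat.pos_of_ne_zero hm) (by omega)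
    have hmod : PySem.Int.mod (m : Int) 2 = ((m % 2 : Nat) : Int) := PySem.Int.mod_natCast m 2
    have hdiv : PySem.Int.floordiv (m : Int) 2 = ((m / 2 : Nat) : Int) := PySem.Int.floordiv_natCast m 2
    have hmapmap : ∀ q : Int, ((lsbPos (m / 2)).map (· + 1)).map (fun i : Nat => (i : Int) + q)
        = (lsbPos (m / 2)).map (fun i : Nat => (i : Int) + (q + 1)) := by
      intro q
      rw [List.map_map]
      apply List.map_congr_left
      intro i _
      simp only [Function.comp_apply]
      push_cast; ring
    rw [binaryGapGo, lsbPos, dif_pos hpos, dif_neg hm, hmod, hdiv]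
    by_cases hb : m % 2 = 1
    · rw [if_pos hb]
      have hne : ((m % 2 : Nat) : Int) ≠ 0 := by rw [hb]; norm_num
      rw [if_pos hne]
      simp only [List.map_cons, Nat.cast_zero, zero_add, hmapmap pos, amax]
      by_cases hl : last ≠ -1
      · rw [if_pos hl, if_pos hl, ih _ hlt]
      · rw [if_neg hl, if_neg hl, ih _ hlt]
    · have h2 : m % 2 = 0 := by omega
      have hne : ¬ ((m % 2 : Nat) : Int) ≠ 0 := by rw [h2]; norm_num
      rw [if_neg (by omega : ¬ m % 2 = 1), if_neg hne, ih _ hlt, hmapmap pos]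

-- forgetting the -1 sentinel: amax is a running max over the gaps
lemma amax_eq_foldl (l : List Int) :
    ∀ (last mg : Int), (∀ x ∈ l, x ≠ -1) → last ≠ -1 →
      amax l last mg = (gapsFrom last l).foldl max mg := by
  induction l with
  | nil => intro last mg _ _; rfl
  | cons p t ih =>
    intro last mg hl hlast
    rw [amax, gapsFrom, if_pos hlast, List.foldl_cons]
    exact ih p (max mg (p - last)) (fun x hx => hl x (List.mem_cons_of_mem _ hx))
      (hl p List.mem_cons_self)

lemma foldl_max_acc (l : List Int) : ∀ a b : Int, l.foldl max (max a b) = max a (l.foldl max b) := by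
  induction l with
  | nil => intro a b; rfl
  | cons c t ih =>
    intro a b
    rw [List.foldl_cons, List.foldl_cons, max_assoc, ih a (max b c)]

lemma foldl_max_reverse (l : List Int) : ∀ a : Int, l.reverse.foldl max a = l.foldl max a := by
  induction l with
  | nil => intro a; rfl
  | cons x t ih =>
    intro a
    rw [List.reverse_cons, List.foldl_append, List.foldl_cons, List.foldl_nil, List.foldl_cons,
      ih, max_comm a x, foldl_max_acc t x a, max_comm]

-- max(d, default=0) as a running max, for positive entries
lemma maxD_eq_foldl (d : List Int) (hd : ∀ x ∈ d, 0 < x) :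
    (PySem.List.max? d (fun y => y)).getD 0 = d.foldl max 0 := by
  cases d with
  | nil => rfl
  | cons x t =>
    rw [PySem.List.max?_id_cons, Option.getD_some, List.foldl_cons]
    have hx : 0 < x := hd x List.mem_cons_self
    rw [max_comm, max_eq_left hx.le]

-- appending one element to the right adds one gap at the right
lemma adjDiffs_append_singleton (l : List Int) (y : Int) :
    adjDiffs (l ++ [y]) = adjDiffs l ++ (l.getLast?.map (fun z => y - z)).toList := by
  induction l with
  | nil => rfl
  | cons a t ih =>
    cases t with
    | nil => rfl
    | cons b t' =>
      rw [List.cons_append, List.cons_append, adjDiffs_cons_cons, ← List.cons_append,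
        ih, adjDiffs_cons_cons]
      simp

-- reversing a strictly-antitone relabelling reverses the gaps
lemma adjDiffs_map_sub_reverse (v : List Int) (C : Int) :
    adjDiffs ((v.map (fun x => C - x)).reverse) = (adjDiffs v).reverse := by
  induction v with
  | nil => rfl
  | cons x t ih =>
    rw [List.map_cons, List.reverse_cons, adjDiffs_append_singleton, ih]
    cases t with
    | nil => rfl
    | cons b t' =>
      rw [adjDiffs_cons_cons, List.reverse_cons]
      congr 1
      rw [List.getLast?_reverse]
      simp only [List.map_cons, List.head?_cons, Option.map_some]
      simp only [Option.toList_some]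
      congr 1
      ring

-- B's position list, via the LSB-first positions
lemma ones_bitsOf (m : Nat) :
    ∀ s : Int,
      (PySem.List.enumerate (bitsOf m) s).filterMap
          (fun ic => if ic.2 = 1 then some ic.1 else none)
        = ((lsbPos m).reverse).map (fun i : Nat => s + ((bitsOf m).length : Int) - 1 - (i : Int)) := by
  induction m using Nat.strong_induction_on with
  | _ m ih =>
    intro s
    by_cases hm : m = 0
    · subst hm; rw [bitsOf, lsbPos]; rfl
    have hlt : m / 2 < m := Nat.div_lt_self (Nat.pos_of_ne_zero hm) (by omega)
    rw [bitsOf, dif_neg hm, PySem.List.enumerate_append, List.filterMap_append, ih _ hlt s]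
    have hlen : ((bitsOf (m / 2) ++ [m % 2]).length : Int) = ((bitsOf (m / 2)).length : Int) + 1 := by
      simp
    have hsingle : (PySem.List.enumerate [m % 2] (s + ((bitsOf (m / 2)).length : Int))).filterMap
        (fun ic => if ic.2 = 1 then some ic.1 else none)
        = if m % 2 = 1 then [s + ((bitsOf (m / 2)).length : Int)] else [] := by
      rw [PySem.List.enumerate_cons, PySem.List.enumerate_nil]
      by_cases hb : m % 2 = 1 <;> simp [hb]
    rw [hsingle, hlen]
    conv_rhs => rw [lsbPos]
    rw [dif_neg hm]
    by_cases hb : m % 2 = 1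
    · rw [if_pos hb, if_pos hb, List.reverse_cons, List.map_append]
      congr 1
      · simp only [List.map_reverse, List.map_map]
        congr 1
        apply List.map_congr_left
        intro i _
        simp only [Function.comp_apply]
        push_cast; ring
      · simp only [List.map_cons, List.map_nil, Nat.cast_zero]
        congr 1
        ring
    · rw [if_neg hb, if_neg hb, List.append_nil]
      simp only [List.map_reverse, List.map_map]
      congr 1
      apply List.map_congr_left
      intro i _
      simp only [Function.comp_apply]
      push_cast; ring

-- the two sides for positive m
lemma main_pos (m : Nat) (hm : m ≠ 0) :
    binaryGapGo (m : Int) (-1) 0 0 =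
      (PySem.List.max?
        (List.zipWith (fun a b => b - a)
          ((PySem.List.enumerate (bitsOf m) 0).filterMap (fun ic => if ic.2 = 1 then some ic.1 else none))
          (PySem.List.slice
            ((PySem.List.enumerate (bitsOf m) 0).filterMap (fun ic => if ic.2 = 1 then some ic.1 else none))
            (some 1) none))
        (fun y => y)).getD 0 := by
  -- abbreviations
  set u : List Int := (lsbPos m).map (fun i : Nat => (i : Int)) with hu
  have hchain : u.IsChain (· < ·) := by
    rw [hu, List.isChain_map]
    exact (lsbPos_chain m).imp (by intro a b h; exact_mod_cast h)
  have hne : u ≠ [] := by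
    rw [hu]; exact fun h => lsbPos_ne_nil m hm (List.map_eq_nil_iff.mp h)
  -- A side
  have hA : binaryGapGo (m : Int) (-1) 0 0 = (adjDiffs u).foldl max 0 := by
    rw [binaryGapGo_eq_amax m (-1) 0 0]
    simp only [add_zero]
    rw [← hu]
    rcases List.exists_cons_of_ne_nil hne with ⟨p, t, hpt⟩
    have hnn : ∀ x ∈ u, 0 ≤ x := by
      rw [hu]; intro x hx
      rcases List.mem_map.mp hx with ⟨i, _, hi⟩
      omega
    rw [hpt, amax, if_neg (by simp)]
    rw [amax_eq_foldl t p 0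
      (fun x hx => by have := hnn x (hpt ▸ List.mem_cons_of_mem _ hx); omega)
      (by have := hnn p (hpt ▸ List.mem_cons_self); omega)]
    rw [gapsFrom_eq_adjDiffs, ← hpt]
  -- B side
  have hpos : (PySem.List.enumerate (bitsOf m) 0).filterMap
      (fun ic => if ic.2 = 1 then some ic.1 else none)
      = ((u.map (fun x => (0 : Int) + ((bitsOf m).length : Int) - 1 - x)).reverse) := by
    rw [ones_bitsOf m 0, hu, ← List.map_reverse, ← List.map_reverse, List.map_map]
    rfl
  rw [hA, hpos, PySem.List.slice_from_one]
  have hC : (u.map (fun x => (0 : Int) + ((bitsOf m).length : Int) - 1 - x)).reverse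
      = (u.map (fun x => ((0 : Int) + ((bitsOf m).length : Int) - 1) - x)).reverse := rfl
  rw [hC]
  have hdiffs : List.zipWith (fun a b => b - a)
      ((u.map (fun x => ((0 : Int) + ((bitsOf m).length : Int) - 1) - x)).reverse)
      ((u.map (fun x => ((0 : Int) + ((bitsOf m).length : Int) - 1) - x)).reverse).tail
      = (adjDiffs u).reverse := adjDiffs_map_sub_reverse u _
  rw [show List.zipWith (fun a b => b - a)
      ((u.map (fun x => ((0 : Int) + ((bitsOf m).length : Int) - 1) - x)).reverse)
      (((u.map (fun x => ((0 : Int) + ((bitsOf m).length : Int) - 1) - x)).reverse).tail)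
      = adjDiffs ((u.map (fun x => ((0 : Int) + ((bitsOf m).length : Int) - 1) - x)).reverse) from rfl,
    adjDiffs_map_sub_reverse u _]
  rw [maxD_eq_foldl _ (fun x hx => adjDiffs_pos u hchain x (List.mem_reverse.mp hx))]
  rw [foldl_max_reverse]

-- ===== VERDICT (by name: the statement is the Claim_ definition above) =====
theorem binaryGap_spec : Claim_equal_binaryGap := by
  intro n _
  unfold Spec_binaryGap binaryGap binaryGap_alt
  by_cases hn : 0 < n
  · rw [if_neg (by omega : ¬ n ≤ 0)]
    have hm : n = ((n.toNat : Nat) : Int) := by omega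
    have hm0 : n.toNat ≠ 0 := by omega
    rw [hm]
    exact main_pos n.toNat hm0
  · rw [binaryGapGo, dif_neg hn, if_pos (by omega : n ≤ 0)]
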